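-- pv_equiv track=rewrite | github.com/heemin88/algorithm | 프로그래머스/lv1/12918. 문자열 다루기 기본/문자열 다루기 기본.py | solution
-- ===== SOURCE A (Python) =====
-- def solution(s):
--     if len(s) == 4 or len(s)==6 :
--         for ss in s:
--             if 48<=ord(ss)<= 57:
--                 continue
--             else:
--                 return False
--     else:
--         return False
--
--     return True
-- ===== SOURCE B (Python) =====
-- import re
--
-- def solution(s):
--     return bool(re.fullmatch(r'[0-9]{4}|[0-9]{6}', s))
-- ===== Notes on version B (the rewrite author's own statement) =====
-- stated objective: idiomatic
-- what changed: Replaced the explicit length check plus character loop with early returns by a single regex fullmatch of [0-9]{4}|[0-9]{6} wrapped in bool().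
import Mathlib
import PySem

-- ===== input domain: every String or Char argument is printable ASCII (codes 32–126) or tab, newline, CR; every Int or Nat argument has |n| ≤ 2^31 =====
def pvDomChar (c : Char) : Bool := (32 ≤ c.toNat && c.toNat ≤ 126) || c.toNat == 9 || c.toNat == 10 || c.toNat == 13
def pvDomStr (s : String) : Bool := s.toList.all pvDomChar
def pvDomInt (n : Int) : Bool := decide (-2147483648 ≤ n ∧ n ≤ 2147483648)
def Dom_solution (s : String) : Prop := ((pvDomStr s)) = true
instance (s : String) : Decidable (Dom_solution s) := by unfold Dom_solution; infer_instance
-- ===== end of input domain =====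

-- B replaces A's length check + per-character loop by one regex fullmatch ([0-9]{4}|[0-9]{6}); idiomatic, same cost.

-- ===== PORT A =====
-- A's for-loop with early `return False`: structural recursion over the characters.
def solutionLoop : List Char → Bool
  | [] => true
  | c :: rest => if 48 ≤ c.toNat ∧ c.toNat ≤ 57 then solutionLoop rest else false

def solution (s : String) : Bool :=
  if s.toList.length = 4 ∨ s.toList.length = 6 then solutionLoop s.toList else false

-- ===== PORT B =====
-- Source B calls re.fullmatch(r'[0-9]{4}|[0-9]{6}', s); the library call is ported as its
-- exact meaning: the whole string is 4 or 6 ASCII digits ('0'-'9').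
def solution_alt (s : String) : Bool :=
  (s.toList.length == 4 || s.toList.length == 6) && s.toList.all (fun c => '0' ≤ c && c ≤ '9')

-- ===== PRECONDITION & SPEC =====
def Spec_solution (s : String) (out : Bool) : Prop := out = solution_alt s
instance (s : String) (out : Bool) : Decidable (Spec_solution s out) := by unfold Spec_solution; infer_instance

-- ===== CLAIM (what is proved, stated in full; the proofs are below) =====
def Claim_equal_solution : Prop := ∀ (s : String), Dom_solution s → Spec_solution s (solution s)

-- ===== LEMMAS AND PROOFS =====

lemma solutionLoop_eq_all (l : List Char) :
    solutionLoop l = l.all (fun c => '0' ≤ c && c ≤ '9') := by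
  induction l with
  | nil => rfl
  | cons c rest ih =>
    simp only [solutionLoop, List.all_cons, ih]
    by_cases h : 48 ≤ c.toNat ∧ c.toNat ≤ 57
    · simp only [if_pos h]
      have h1 : '0' ≤ c := by rw [Char.le_def]; exact h.1
      have h2 : c ≤ '9' := by rw [Char.le_def]; exact h.2
      simp [h1, h2]
    · simp only [if_neg h]
      rcases not_and_or.mp h with h' | h'
      · have : ¬ ('0' ≤ c) := by rw [Char.le_def]; exact h'
        simp [this]
      · have : ¬ (c ≤ '9') := by rw [Char.le_def]; exact h'
        simp [this]

-- ===== VERDICT (by name: the statement is the Claim_ definition above) =====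
theorem solution_spec : Claim_equal_solution := by
  intro s _
  unfold Spec_solution solution solution_alt
  rw [solutionLoop_eq_all]
  by_cases h : s.toList.length = 4 ∨ s.toList.length = 6
  · rw [if_pos h]
    have hb : (s.toList.length == 4 || s.toList.length == 6) = true := by
      rcases h with h | h <;> simp [h]
    rw [hb, Bool.true_and]
  · rw [if_neg h]
    have hb : (s.toList.length == 4 || s.toList.length == 6) = false := by
      simpa [not_or] using h
    rw [hb, Bool.false_and]
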